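-- pv_equiv track=rewrite | github.com/ShathaVarsha/Multimodal-Mental-Health-Screening-System-using-Text-and-Video-Cues-DAIC-WOZ-Dataset- | backend/services/llm_service.py | _detect_emotion_language
-- ===== SOURCE A (Python) =====
-- from typing import Dict, List, Optional
--
-- def _detect_emotion_language(tokens: List[str]) -> Dict:
--     """Detect emotionally charged language"""
--     emotion_words = {
--         'sadness': ['sad', 'depressed', 'unhappy', 'miserable', 'sorrowful'],
--         'anxiety': ['anxiety', 'anxious', 'worried', 'nervous', 'scared', 'afraid'],
--         'anger': ['angry', 'furious', 'rage', 'mad', 'irritated'],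
--         'hopelessness': ['hopeless', 'helpless', 'worthless', 'useless', 'pointless']
--     }
--
--     results = {}
--     for emotion, words in emotion_words.items():
--         count = sum(1 for token in tokens if token in words)
--         results[emotion] = count
--
--     return results
-- ===== SOURCE B (Python) =====
-- def _detect_emotion_language(tokens):
--     """Detect emotionally charged language (inverted-index single pass)."""
--     emotion_words = {
--         'sadness': ['sad', 'depressed', 'unhappy', 'miserable', 'sorrowful'],
--         'anxiety': ['anxiety', 'anxious', 'worried', 'nervous', 'scared', 'afraid'],
--         'anger': ['angry', 'furious', 'rage', 'mad', 'irritated'],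
--         'hopelessness': ['hopeless', 'helpless', 'worthless', 'useless', 'pointless']
--     }
--     index = {w: e for e, ws in emotion_words.items() for w in ws}
--     results = {e: 0 for e in emotion_words}
--     for t in tokens:
--         e = index.get(t)
--         if e is not None:
--             results[e] += 1
--     return results
-- ===== Notes on version B (the rewrite author's own statement) =====
-- stated objective: faster
-- what changed: Replaces the four per-emotion scans over the token list by one inverted word-to-emotion index built from the fixed table plus a single pass over the tokens incrementing a pre-seeded results dict.
import Mathlib
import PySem

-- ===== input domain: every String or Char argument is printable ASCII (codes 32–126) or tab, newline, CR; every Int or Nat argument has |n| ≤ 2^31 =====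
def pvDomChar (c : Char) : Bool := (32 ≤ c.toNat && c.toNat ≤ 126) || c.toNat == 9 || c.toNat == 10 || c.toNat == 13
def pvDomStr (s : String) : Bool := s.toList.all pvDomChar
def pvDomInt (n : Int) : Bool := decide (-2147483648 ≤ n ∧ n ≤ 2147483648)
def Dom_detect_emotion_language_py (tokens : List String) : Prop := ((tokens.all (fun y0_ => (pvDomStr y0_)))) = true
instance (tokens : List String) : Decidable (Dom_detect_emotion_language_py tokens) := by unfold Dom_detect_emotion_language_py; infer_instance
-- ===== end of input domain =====

-- B replaces four per-emotion scans over the tokens by one inverted word->emotion index and a single pass (idiomatic).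
-- B replaces four per-emotion scans over the tokens by one inverted word->emotion index and a single pass (idiomatic).
-- B replaces four per-emotion scans over the tokens by one inverted word->emotion index and a single pass (idiomatic).
-- B replaces four per-emotion scans over the tokens by one inverted word->emotion index and a single pass (idiomatic).
-- B replaces four per-emotion scans over the tokens by one inverted word->emotion index and a single pass (idiomatic).
-- B replaces four per-emotion scans over the tokens by one inverted word->emotion index and a single pass (idiomatic).
-- B replaces four per-emotion scans over the tokens by one inverted word->emotion index and a single pass (idiomatic).
-- B replaces four per-emotion scans over the tokens by one inverted word->emotion index and a single pass (idiomatic).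
-- B replaces four per-emotion scans over the tokens by one inverted word->emotion index and a single pass (idiomatic).
-- ===== PORT A =====
def pvEmotionWords : List (String × List String) :=
  [("sadness", ["sad", "depressed", "unhappy", "miserable", "sorrowful"]),
   ("anxiety", ["anxiety", "anxious", "worried", "nervous", "scared", "afraid"]),
   ("anger", ["angry", "furious", "rage", "mad", "irritated"]),
   ("hopelessness", ["hopeless", "helpless", "worthless", "useless", "pointless"])]

def detect_emotion_language_py (tokens : List String) : List (String × Int) :=
  (pvEmotionWords.foldl
    (fun results p =>
      results.insert p.1
        (((tokens.filter (fun t => p.2.contains t)).map (fun _ => (1 : Int))).sum))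
    PySem.Dict.empty).items

-- ===== PORT B =====
def detect_emotion_language_py_alt (tokens : List String) : List (String × Int) :=
  let index : PySem.Dict String String :=
    pvEmotionWords.foldl (fun d p => p.2.foldl (fun d w => d.insert w p.1) d) PySem.Dict.empty
  let results0 : PySem.Dict String Int :=
    pvEmotionWords.foldl (fun d p => d.insert p.1 0) PySem.Dict.empty
  let results := tokens.foldl
    (fun d t =>
      match index.get? t with
      | some e => d.modify e 0 (· + 1)
      | none => d) results0
  results.items

-- ===== PRECONDITION & SPEC =====
def Spec_detect_emotion_language_py (tokens : List String) (out : List (String × Int)) : Prop := out = detect_emotion_language_py_alt tokens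
instance (tokens : List String) (out : List (String × Int)) : Decidable (Spec_detect_emotion_language_py tokens out) := by unfold Spec_detect_emotion_language_py; infer_instance

-- ===== CLAIM (what is proved, stated in full; the proofs are below) =====
def Claim_equal_detect_emotion_language_py : Prop := ∀ (tokens : List String), Dom_detect_emotion_language_py tokens → Spec_detect_emotion_language_py tokens (detect_emotion_language_py tokens)

-- ===== LEMMAS AND PROOFS =====

-- the inverted index B builds, as a literal dict
def pvIdx : PySem.Dict String String :=
  PySem.Dict.mk
  [("sad","sadness"),("depressed","sadness"),("unhappy","sadness"),("miserable","sadness"),("sorrowful","sadness"),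
   ("anxiety","anxiety"),("anxious","anxiety"),("worried","anxiety"),("nervous","anxiety"),("scared","anxiety"),("afraid","anxiety"),
   ("angry","anger"),("furious","anger"),("rage","anger"),("mad","anger"),("irritated","anger"),
   ("hopeless","hopelessness"),("helpless","hopelessness"),("worthless","hopelessness"),("useless","hopelessness"),("pointless","hopelessness")]

theorem pvIdx_eq :
    pvEmotionWords.foldl (fun d p => p.2.foldl (fun d w => d.insert w p.1) d)
      (PySem.Dict.empty : PySem.Dict String String) = pvIdx := by decide

def pvSadW : List String := ["sad", "depressed", "unhappy", "miserable", "sorrowful"]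
def pvAnxW : List String := ["anxiety", "anxious", "worried", "nervous", "scared", "afraid"]
def pvAngW : List String := ["angry", "furious", "rage", "mad", "irritated"]
def pvHopW : List String := ["hopeless", "helpless", "worthless", "useless", "pointless"]

-- get? on the inverted index, characterised by the four word lists
theorem pvIdx_get? (t : String) :
    pvIdx.get? t =
      if pvSadW.contains t then some "sadness"
      else if pvAnxW.contains t then some "anxiety"
      else if pvAngW.contains t then some "anger"
      else if pvHopW.contains t then some "hopelessness"
      else none := by
  by_cases h1 : t ∈ pvSadW
  · fin_cases h1 <;> decide
  by_cases h2 : t ∈ pvAnxW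
  · fin_cases h2 <;> decide
  by_cases h3 : t ∈ pvAngW
  · fin_cases h3 <;> decide
  by_cases h4 : t ∈ pvHopW
  · fin_cases h4 <;> decide
  simp [pvSadW, pvAnxW, pvAngW, pvHopW] at h1 h2 h3 h4
  obtain ⟨s1, s2, s3, s4, s5⟩ := h1
  obtain ⟨a1, a2, a3, a4, a5, a6⟩ := h2
  obtain ⟨g1, g2, g3, g4, g5⟩ := h3
  obtain ⟨p1, p2, p3, p4, p5⟩ := h4
  simp [pvIdx, PySem.Dict.get?, List.find?, pvSadW, pvAnxW, pvAngW, pvHopW,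
        s1, s2, s3, s4, s5, a1, a2, a3, a4, a5, a6, g1, g2, g3, g4, g5, p1, p2, p3, p4, p5,
        show ("sad" == t) = false by exact beq_eq_false_iff_ne.mpr (Ne.symm s1),
        show ("depressed" == t) = false by exact beq_eq_false_iff_ne.mpr (Ne.symm s2),
        show ("unhappy" == t) = false by exact beq_eq_false_iff_ne.mpr (Ne.symm s3),
        show ("miserable" == t) = false by exact beq_eq_false_iff_ne.mpr (Ne.symm s4),
        show ("sorrowful" == t) = false by exact beq_eq_false_iff_ne.mpr (Ne.symm s5),
        show ("anxiety" == t) = false by exact beq_eq_false_iff_ne.mpr (Ne.symm a1),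
        show ("anxious" == t) = false by exact beq_eq_false_iff_ne.mpr (Ne.symm a2),
        show ("worried" == t) = false by exact beq_eq_false_iff_ne.mpr (Ne.symm a3),
        show ("nervous" == t) = false by exact beq_eq_false_iff_ne.mpr (Ne.symm a4),
        show ("scared" == t) = false by exact beq_eq_false_iff_ne.mpr (Ne.symm a5),
        show ("afraid" == t) = false by exact beq_eq_false_iff_ne.mpr (Ne.symm a6),
        show ("angry" == t) = false by exact beq_eq_false_iff_ne.mpr (Ne.symm g1),
        show ("furious" == t) = false by exact beq_eq_false_iff_ne.mpr (Ne.symm g2),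
        show ("rage" == t) = false by exact beq_eq_false_iff_ne.mpr (Ne.symm g3),
        show ("mad" == t) = false by exact beq_eq_false_iff_ne.mpr (Ne.symm g4),
        show ("irritated" == t) = false by exact beq_eq_false_iff_ne.mpr (Ne.symm g5),
        show ("hopeless" == t) = false by exact beq_eq_false_iff_ne.mpr (Ne.symm p1),
        show ("helpless" == t) = false by exact beq_eq_false_iff_ne.mpr (Ne.symm p2),
        show ("worthless" == t) = false by exact beq_eq_false_iff_ne.mpr (Ne.symm p3),
        show ("useless" == t) = false by exact beq_eq_false_iff_ne.mpr (Ne.symm p4),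
        show ("pointless" == t) = false by exact beq_eq_false_iff_ne.mpr (Ne.symm p5)]

-- incrementing one of the four fixed keys
theorem pvMod (a b c h : Int) (e : String)
    (he : e = "sadness" ∨ e = "anxiety" ∨ e = "anger" ∨ e = "hopelessness") :
    (PySem.Dict.mk [("sadness", a), ("anxiety", b), ("anger", c), ("hopelessness", h)]).modify e 0 (· + 1)
    = PySem.Dict.mk
        [("sadness", if e = "sadness" then a + 1 else a),
         ("anxiety", if e = "anxiety" then b + 1 else b),
         ("anger", if e = "anger" then c + 1 else c),
         ("hopelessness", if e = "hopelessness" then h + 1 else h)] := by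
  rcases he with rfl | rfl | rfl | rfl <;>
    simp [PySem.Dict.modify, PySem.Dict.get?, PySem.Dict.getD, PySem.Dict.contains,
          PySem.Dict.insert]

-- B's token loop, on a dict with the four emotion keys and arbitrary counts
theorem pvLoopB (ts : List String) (a b c h : Int) :
    ts.foldl
      (fun d t =>
        match pvIdx.get? t with
        | some e => d.modify e 0 (· + 1)
        | none => d)
      (PySem.Dict.mk [("sadness", a), ("anxiety", b), ("anger", c), ("hopelessness", h)])
    = PySem.Dict.mk
        [("sadness", a + (ts.countP (fun t => pvSadW.contains t) : Int)),
         ("anxiety", b + (ts.countP (fun t => pvAnxW.contains t) : Int)),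
         ("anger", c + (ts.countP (fun t => pvAngW.contains t) : Int)),
         ("hopelessness", h + (ts.countP (fun t => pvHopW.contains t) : Int))] := by
  induction ts generalizing a b c h with
  | nil => simp
  | cons t ts ih =>
    rw [List.foldl_cons, pvIdx_get? t]
    by_cases h1 : t ∈ pvSadW
    · fin_cases h1 <;>
      · rw [show pvSadW.contains _ = true by decide]
        simp only [if_true]
        rw [pvMod _ _ _ _ _ (Or.inl rfl), ih]
        simp [pvSadW, pvAnxW, pvAngW, pvHopW]
        omega
    by_cases h2 : t ∈ pvAnxW
    · fin_cases h2 <;>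
      · rw [show pvSadW.contains _ = false by decide, show pvAnxW.contains _ = true by decide]
        simp only [if_true, Bool.false_eq_true, if_false]
        rw [pvMod _ _ _ _ _ (Or.inr (Or.inl rfl)), ih]
        simp [pvSadW, pvAnxW, pvAngW, pvHopW]
        omega
    by_cases h3 : t ∈ pvAngW
    · fin_cases h3 <;>
      · rw [show pvSadW.contains _ = false by decide, show pvAnxW.contains _ = false by decide,
            show pvAngW.contains _ = true by decide]
        simp only [if_true, Bool.false_eq_true, if_false]
        rw [pvMod _ _ _ _ _ (Or.inr (Or.inr (Or.inl rfl))), ih]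
        simp [pvSadW, pvAnxW, pvAngW, pvHopW]
        omega
    by_cases h4 : t ∈ pvHopW
    · fin_cases h4 <;>
      · rw [show pvSadW.contains _ = false by decide, show pvAnxW.contains _ = false by decide,
            show pvAngW.contains _ = false by decide, show pvHopW.contains _ = true by decide]
        simp only [if_true, Bool.false_eq_true, if_false]
        rw [pvMod _ _ _ _ _ (Or.inr (Or.inr (Or.inr rfl))), ih]
        simp [pvSadW, pvAnxW, pvAngW, pvHopW]
        omega
    · rw [show pvSadW.contains t = false by simpa using h1,
          show pvAnxW.contains t = false by simpa using h2,
          show pvAngW.contains t = false by simpa using h3,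
          show pvHopW.contains t = false by simpa using h4]
      simp only [Bool.false_eq_true, if_false]
      rw [ih]
      simp [List.countP_cons]
      exact ⟨h1, h2, h3, h4⟩

-- ===== VERDICT (by name: the statement is the Claim_ definition above) =====
theorem detect_emotion_language_py_spec : Claim_equal_detect_emotion_language_py := by
  intro tokens _
  unfold Spec_detect_emotion_language_py detect_emotion_language_py detect_emotion_language_py_alt
  rw [pvIdx_eq]
  show _ = (tokens.foldl _ (PySem.Dict.mk [("sadness", 0), ("anxiety", 0), ("anger", 0), ("hopelessness", 0)])).items
  rw [pvLoopB]
  simp [pvEmotionWords, PySem.Dict.insert, PySem.Dict.empty,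
        pvSadW, pvAnxW, pvAngW, pvHopW, List.countP_eq_length_filter]
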